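-- pv_equiv track=rewrite | github.com/mislavzanic/advent-of-code | src/y2015/8.py | part1
-- ===== SOURCE A (Python) =====
-- def part1(lines):
--     C, M = 0, 0
--     for line in lines:
--         code, memory = 2, 0
--         line = line[1:-1]
--         num = len(line)
--         code, memory = code + num, memory + num
--         i = 0
--         while i < len(line):
--             c = line[i]
--             if c == '\\':
--                 if line[i + 1] == 'x':
--                     memory -= 3
--                     i += 3
--                 elif line[i + 1] == '\\' or line[i + 1] == '\"':
--                     memory -= 1
--                     i += 1
--             i += 1
--         C, M = C + code, M + memory
--     return C - M
-- ===== SOURCE B (Python) =====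
-- def part1(lines):
--     total = 0
--     for line in lines:
--         total = _escapes(line[1:-1], total + 2)
--     return total
--
--
-- def _escapes(s, total):
--     # Jump straight to each backslash with str.find instead of walking every
--     # character; classify the escape by the single following character.
--     while True:
--         i = s.find('\\')
--         if i < 0:
--             return total
--         nxt = s[i + 1:i + 2]
--         if nxt == 'x':
--             total += 3
--             s = s[i + 4:]
--         else:
--             if nxt == '\\' or nxt == '"':
--                 total += 1
--             s = s[i + 2:]
-- ===== Notes on version B (the rewrite author's own statement) =====
-- stated objective: faster
-- what changed: A's per-character index loop with separate code/memory counters is replaced by str.find jumps to each backslash, classifying each escape by the single following character and adding its contribution (2 per line, +3 per \x.., +1 per \\ or \") to one running total.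
import Mathlib
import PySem

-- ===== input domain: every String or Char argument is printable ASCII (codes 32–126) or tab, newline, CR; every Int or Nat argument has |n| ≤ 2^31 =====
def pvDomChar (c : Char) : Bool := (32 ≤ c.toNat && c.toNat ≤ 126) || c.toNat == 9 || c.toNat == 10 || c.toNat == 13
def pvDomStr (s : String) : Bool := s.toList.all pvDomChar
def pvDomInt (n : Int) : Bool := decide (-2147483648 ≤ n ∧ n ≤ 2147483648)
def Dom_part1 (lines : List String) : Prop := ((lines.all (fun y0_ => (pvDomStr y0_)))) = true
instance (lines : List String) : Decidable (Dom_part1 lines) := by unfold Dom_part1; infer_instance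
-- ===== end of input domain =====

-- B replaces A's per-character index loop (with its code/memory counters) by str.find jumps
-- to each backslash, adding each escape's contribution to one running total.

-- ===== PORT A =====
-- A's inner while loop: i the index into the stripped line, memory the running counter
def part1LineLoop (l : List Char) (i : Nat) (memory : Int) : Int :=
  if h : i < l.length then
    let c := l[i]
    if c = '\\' then
      match PySem.List.pyGet? l ((i : Int) + 1) with
      | some c2 =>
        if c2 = 'x' then part1LineLoop l (i + 4) (memory - 3)
        else if c2 = '\\' ∨ c2 = '"' then part1LineLoop l (i + 2) (memory - 1)
        else part1LineLoop l (i + 1) memory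
      | none => memory
    else part1LineLoop l (i + 1) memory
  else memory
termination_by l.length - i

def part1 (lines : List String) : Int :=
  let CM : Int × Int := lines.foldl (fun (CM : Int × Int) (line : String) =>
    let l := PySem.List.slice line.toList (some 1) (some (-1))
    let num : Int := l.length
    let code : Int := 2 + num
    let memory : Int := 0 + num
    let memory := part1LineLoop l 0 memory
    (CM.1 + code, CM.2 + memory)) (0, 0)
  CM.1 - CM.2

-- ===== PORT B =====
-- termination fact for the loop: a found needle index lies inside the string
theorem findBackslash_lt {s : List Char} (h : ¬ PySem.Chars.find s ['\\'] < 0) :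
    (PySem.Chars.find s ['\\']).toNat < s.length := by
  have hocc : ['\\'] <+: s.drop (PySem.Chars.find s ['\\']).toNat :=
    (PySem.Chars.find_spec (le_of_not_gt h)).1
  by_contra hge
  rw [List.drop_eq_nil_of_le (le_of_not_gt hge)] at hocc
  exact (List.cons_ne_nil _ _) (List.prefix_nil.mp hocc)

-- Source B's _escapes while loop
def escapesLoop (s : List Char) (total : Int) : Int :=
  let i := PySem.Chars.find s ['\\']
  if h : i < 0 then total
  else
    let nxt := PySem.List.slice s (some (i + 1)) (some (i + 2))
    if nxt = ['x'] then
      escapesLoop (PySem.List.slice s (some (i + 4)) none) (total + 3)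
    else
      escapesLoop (PySem.List.slice s (some (i + 2)) none)
        (if nxt = ['\\'] ∨ nxt = ['"'] then total + 1 else total)
termination_by s.length
decreasing_by
  · rw [PySem.List.slice_from s (by have := PySem.Chars.neg_one_le_find s ['\\']; omega)]
    have := findBackslash_lt h
    simp only [List.length_drop]
    omega
  · rw [PySem.List.slice_from s (by have := PySem.Chars.neg_one_le_find s ['\\']; omega)]
    have := findBackslash_lt h
    simp only [List.length_drop]
    omega

def part1_alt (lines : List String) : Int :=
  lines.foldl
    (fun total line =>
      escapesLoop (PySem.List.slice line.toList (some 1) (some (-1))) (total + 2)) 0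

-- ===== PRECONDITION & SPEC =====
-- lineOk cs = false exactly when A's escape scan of cs lands on a lone final backslash
-- (there Python A raises IndexError reading line[i + 1])
def lineOk : List Char → Bool
  | [] => true
  | [c] => !(c = '\\')
  | c :: c2 :: rest2 =>
    if c = '\\' then
      if c2 = 'x' then
        match rest2 with
        | [] => true
        | [_] => true
        | _ :: _ :: r => lineOk r
      else if c2 = '\\' ∨ c2 = '"' then lineOk rest2
      else lineOk (c2 :: rest2)
    else lineOk (c2 :: rest2)

-- Pre_ excludes exactly the inputs on which Python A raises IndexError (a line whose
-- stripped interior ends in a dangling backslash reached by the scan); A returns on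
-- every input Pre_ admits.
def Pre_part1 (lines : List String) : Prop :=
  ∀ line ∈ lines, lineOk (PySem.List.slice line.toList (some 1) (some (-1))) = true
instance (lines : List String) : Decidable (Pre_part1 lines) := by
  unfold Pre_part1; infer_instance

def pvWitness_part1 : List String := ["\"\\\\\""]

def Spec_part1 (lines : List String) (out : Int) : Prop := out = part1_alt lines
instance (lines : List String) (out : Int) : Decidable (Spec_part1 lines out) := by
  unfold Spec_part1; infer_instance

-- ===== CLAIM (what is proved, stated in full; the proofs are below) =====
def Claim_equal_part1 : Prop :=
  ∀ (lines : List String), Dom_part1 lines → Pre_part1 lines → Spec_part1 lines (part1 lines)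
-- ===== LEMMAS AND PROOFS =====
-- tokExtra: the per-line escape surplus both loops compute (+3 per '\x..', +1 per '\\', '\"')
theorem drop_eq_cons_of_lt {l : List Char} {i : Nat} (h : i < l.length) :
    l.drop i = l[i] :: l.drop (i + 1) := by
  rw [List.drop_eq_getElem_cons h]

theorem pyGet_cast (l : List Char) (i : Nat) :
    PySem.List.pyGet? l ((i : Int) + 1) = l[i + 1]? := by
  have : ((i : Int) + 1) = ((i + 1 : Nat) : Int) := by push_cast; ring
  rw [this, PySem.List.pyGet?_natCast]

def tokExtra : List Char → Int
  | [] => 0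
  | [_] => 0
  | c :: c2 :: rest2 =>
    if c = '\\' then
      if c2 = 'x' then
        3 + (match rest2 with
             | [] => 0
             | [_] => 0
             | _ :: _ :: r => tokExtra r)
      else if c2 = '\\' ∨ c2 = '"' then 1 + tokExtra rest2
      else tokExtra (c2 :: rest2)
    else tokExtra (c2 :: rest2)

theorem tokExtra_cons_cons (c c2 : Char) (rest2 : List Char) :
    tokExtra (c :: c2 :: rest2) =
      if c = '\\' then
        if c2 = 'x' then 3 + tokExtra (rest2.drop 2)
        else if c2 = '\\' ∨ c2 = '"' then 1 + tokExtra rest2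
        else tokExtra (c2 :: rest2)
      else tokExtra (c2 :: rest2) := by
  rw [tokExtra.eq_def]
  rcases rest2 with _ | ⟨a, _ | ⟨b, r⟩⟩ <;> simp [tokExtra]

theorem tokExtra_of_no_backslash {s : List Char} (h : '\\' ∉ s) : tokExtra s = 0 := by
  induction s with
  | nil => rfl
  | cons c rest ih =>
    have hc : c ≠ '\\' := fun hc => h (hc ▸ List.mem_cons_self ..)
    have hrest : '\\' ∉ rest := fun hm => h (List.mem_cons_of_mem _ hm)
    cases rest with
    | nil => rfl
    | cons c2 rest2 =>
      rw [tokExtra.eq_def]; simp only [if_neg hc]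
      exact ih hrest

theorem tokExtra_skip (n : Nat) (s : List Char)
    (h : ∀ j, j < n → ∀ hj : j < s.length, s[j] ≠ '\\') :
    tokExtra s = tokExtra (s.drop n) := by
  induction n generalizing s with
  | zero => simp
  | succ m ih =>
    cases s with
    | nil => simp
    | cons c rest =>
      have hc : c ≠ '\\' := h 0 (Nat.succ_pos m) (by simp)
      have step : tokExtra (c :: rest) = tokExtra rest := by
        cases rest with
        | nil => rfl
        | cons c2 rest2 => rw [tokExtra.eq_def]; simp only [if_neg hc]
      rw [step, List.drop_succ_cons]
      exact ih rest (fun j hj hjl => by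
        have := h (j + 1) (Nat.succ_lt_succ hj) (by simpa using Nat.succ_lt_succ hjl)
        simpa using this)

theorem part1LineLoop_eq (l : List Char) (i : Nat) (memory : Int) :
    part1LineLoop l i memory = memory - tokExtra (l.drop i) := by
  fun_induction part1LineLoop l i memory with
  | case1 i memory h c hc hget ih =>
    have hg : l[i+1]? = some 'x' := by rw [← pyGet_cast]; exact hget
    obtain ⟨h1, he⟩ := List.getElem?_eq_some_iff.mp hg
    have hd : l.drop i = '\\' :: 'x' :: l.drop (i+2) := by
      rw [drop_eq_cons_of_lt h, show l[i] = '\\' from hc, drop_eq_cons_of_lt h1, he]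
    rw [ih, hd, tokExtra_cons_cons]
    have hdd : (l.drop (i+2)).drop 2 = l.drop (i+4) := by
      rw [List.drop_drop]
    simp [hdd]
    omega
  | case2 i memory h c hc c2 hget hx hq ih =>
    have hg : l[i+1]? = some c2 := by rw [← pyGet_cast]; exact hget
    obtain ⟨h1, he⟩ := List.getElem?_eq_some_iff.mp hg
    have hd : l.drop i = '\\' :: c2 :: l.drop (i+2) := by
      rw [drop_eq_cons_of_lt h, show l[i] = '\\' from hc, drop_eq_cons_of_lt h1, he]
    rw [ih, hd, tokExtra_cons_cons]
    simp [hx, hq]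
    omega
  | case3 i memory h c hc c2 hget hx hq ih =>
    have hg : l[i+1]? = some c2 := by rw [← pyGet_cast]; exact hget
    obtain ⟨h1, he⟩ := List.getElem?_eq_some_iff.mp hg
    have hd : l.drop i = '\\' :: c2 :: l.drop (i+2) := by
      rw [drop_eq_cons_of_lt h, show l[i] = '\\' from hc, drop_eq_cons_of_lt h1, he]
    have hd1 : l.drop (i+1) = c2 :: l.drop (i+2) := by
      rw [drop_eq_cons_of_lt h1, he]
    rw [ih, hd, hd1, tokExtra_cons_cons]
    simp [hx, hq]
  | case4 i memory h c hc hget =>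
    have hg : l[i+1]? = none := by rw [← pyGet_cast]; exact hget
    have h1 : l.length ≤ i + 1 := by
      by_contra hlt
      simp [Nat.lt_of_not_le hlt] at hg
    have hd : l.drop i = ['\\'] := by
      rw [drop_eq_cons_of_lt h, show l[i] = '\\' from hc, List.drop_eq_nil_of_le h1]
    rw [hd]
    simp [tokExtra]
  | case5 i memory h c hc ih =>
    have hd : l.drop i = l[i] :: l.drop (i+1) := drop_eq_cons_of_lt h
    have step : tokExtra (l.drop i) = tokExtra (l.drop (i+1)) := by
      rw [hd]
      rcases hdd : l.drop (i+1) with _ | ⟨a, r⟩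
      · simp [tokExtra]
      · rw [tokExtra_cons_cons, if_neg (show ¬ l[i] = '\\' from hc)]
    rw [ih, step]
  | case6 i memory h =>
    rw [List.drop_eq_nil_of_le (Nat.le_of_not_lt h)]
    simp [tokExtra]

theorem find_setup (s : List Char) (h : ¬ PySem.Chars.find s ['\\'] < 0) :
    tokExtra s = tokExtra (s.drop (PySem.Chars.find s ['\\']).toNat) ∧
    s.drop (PySem.Chars.find s ['\\']).toNat =
      '\\' :: s.drop ((PySem.Chars.find s ['\\']).toNat + 1) := by
  have hlt := findBackslash_lt h
  obtain ⟨hpre, hmin⟩ := PySem.Chars.find_spec (le_of_not_gt h)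
  have hdn : s.drop (PySem.Chars.find s ['\\']).toNat =
      '\\' :: s.drop ((PySem.Chars.find s ['\\']).toNat + 1) := by
    obtain ⟨t, ht⟩ := hpre
    rw [drop_eq_cons_of_lt hlt] at ht ⊢
    have ht' : '\\' = s[(PySem.Chars.find s ['\\']).toNat] ∧
        t = s.drop ((PySem.Chars.find s ['\\']).toNat + 1) := by
      have := List.cons_eq_cons.mp ht
      exact ⟨this.1, this.2⟩
    rw [← ht'.1]
  refine ⟨?_, hdn⟩
  apply tokExtra_skip
  intro j hj hjl heq
  exact hmin j hj ⟨s.drop (j + 1), by rw [drop_eq_cons_of_lt hjl, heq]; rfl⟩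

theorem escapesLoop_nil (total : Int) : escapesLoop [] total = total := by
  rw [escapesLoop]
  simp [show PySem.Chars.find ([] : List Char) ['\\'] = -1 by rfl]

theorem escapesLoop_eq (s : List Char) (total : Int) :
    escapesLoop s total = total + tokExtra s := by
  fun_induction escapesLoop s total with
  | case1 s total i h =>
    have hnb : '\\' ∉ s := by
      have : PySem.Chars.find s ['\\'] = -1 := by
        have := PySem.Chars.neg_one_le_find s ['\\']
        omega
      have hni := (PySem.Chars.find_eq_neg_one_iff s ['\\']).mp this
      intro hm
      obtain ⟨t1, t2, ht⟩ := List.append_of_mem hm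
      exact hni ⟨t1, t2, by simp [ht]⟩
    rw [tokExtra_of_no_backslash hnb]
    omega
  | case2 s total i h nxt hx ih =>
    have hieq : i = PySem.Chars.find s ['\\'] := rfl
    have hnxteq : nxt = PySem.List.slice s (some (i + 1)) (some (i + 2)) := rfl
    clear_value i nxt
    subst hieq
    rw [hnxteq] at hx
    have h0 : (0:Int) ≤ PySem.Chars.find s ['\\'] := le_of_not_gt h
    have hlt := findBackslash_lt h
    obtain ⟨hskip, hdn⟩ := find_setup s h
    have hi : PySem.Chars.find s ['\\'] = ((PySem.Chars.find s ['\\']).toNat : Int) :=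
      (Int.toNat_of_nonneg h0).symm
    have hnxt : PySem.List.slice s (some (PySem.Chars.find s ['\\'] + 1))
        (some (PySem.Chars.find s ['\\'] + 2)) =
        (s.drop ((PySem.Chars.find s ['\\']).toNat + 1)).take 1 := by
      rw [hi]
      rw [show ((((PySem.Chars.find s ['\\']).toNat : Int)) + 1) = (((PySem.Chars.find s ['\\']).toNat + 1 : Nat) : Int) by push_cast; ring,
          show ((((PySem.Chars.find s ['\\']).toNat : Int)) + 2) = (((PySem.Chars.find s ['\\']).toNat + 2 : Nat) : Int) by push_cast; ring,
          PySem.List.slice_natCast]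
      congr 1
      omega
    rw [hnxt] at hx
    rcases hdd : s.drop ((PySem.Chars.find s ['\\']).toNat + 1) with _ | ⟨a, r⟩
    · rw [hdd] at hx; simp at hx
    · rw [hdd] at hx
      simp at hx
      subst hx
      have harg : PySem.List.slice s (some (PySem.Chars.find s ['\\'] + 4)) none =
          r.drop 2 := by
        rw [PySem.List.slice_from s (by omega)]
        have h4 : (PySem.Chars.find s ['\\'] + 4).toNat =
            (PySem.Chars.find s ['\\']).toNat + 1 + 3 := by omega
        rw [h4, ← List.drop_drop, hdd]
        simp
      rw [harg] at ih ⊢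
      rw [ih, hskip, hdn, hdd, tokExtra_cons_cons]
      simp
      omega
  | case3 s total i h nxt hx ih =>
    have hieq : i = PySem.Chars.find s ['\\'] := rfl
    have hnxteq : nxt = PySem.List.slice s (some (i + 1)) (some (i + 2)) := rfl
    clear_value i nxt
    subst hieq
    rw [hnxteq] at hx ih ⊢
    have h0 : (0:Int) ≤ PySem.Chars.find s ['\\'] := le_of_not_gt h
    have hlt := findBackslash_lt h
    obtain ⟨hskip, hdn⟩ := find_setup s h
    have hnxt : PySem.List.slice s (some (PySem.Chars.find s ['\\'] + 1))
        (some (PySem.Chars.find s ['\\'] + 2)) =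
        (s.drop ((PySem.Chars.find s ['\\']).toNat + 1)).take 1 := by
      rw [show (PySem.Chars.find s ['\\'] + 1) = (((PySem.Chars.find s ['\\']).toNat + 1 : Nat) : Int) by omega,
          show (PySem.Chars.find s ['\\'] + 2) = (((PySem.Chars.find s ['\\']).toNat + 2 : Nat) : Int) by omega,
          PySem.List.slice_natCast]
      congr 1
      omega
    have harg : PySem.List.slice s (some (PySem.Chars.find s ['\\'] + 2)) none =
        s.drop ((PySem.Chars.find s ['\\']).toNat + 2) := by
      rw [PySem.List.slice_from s (by omega)]
      congr 1
      omega
    rw [hnxt] at hx ih ⊢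
    rw [harg] at ih ⊢
    rcases hdd : s.drop ((PySem.Chars.find s ['\\']).toNat + 1) with _ | ⟨a, r⟩
    · have hr2 : s.drop ((PySem.Chars.find s ['\\']).toNat + 2) = [] := by
        rw [show (PySem.Chars.find s ['\\']).toNat + 2 = (PySem.Chars.find s ['\\']).toNat + 1 + 1 by omega,
            ← List.drop_drop, hdd]
        simp
      rw [hr2, escapesLoop_nil, hskip, hdn, hdd]
      simp [tokExtra]
    · have hr2 : s.drop ((PySem.Chars.find s ['\\']).toNat + 2) = r := by
        rw [show (PySem.Chars.find s ['\\']).toNat + 2 = (PySem.Chars.find s ['\\']).toNat + 1 + 1 by omega,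
            ← List.drop_drop, hdd]
        simp
      rw [hdd] at hx ih
      rw [hr2] at ih ⊢
      simp only [List.take_succ_cons, List.take_zero] at hx ih ⊢
      have hax : ¬ a = 'x' := by intro ha; exact hx (by simp [ha])
      rw [hskip, hdn, hdd, tokExtra_cons_cons]
      by_cases hq : a = '\\' ∨ a = '"'
      · have hcond : ([a] = ['\\'] ∨ [a] = ['"']) := by
          rcases hq with hh | hh <;> simp [hh]
        rw [dif_pos hcond] at ih
        rw [if_pos hcond, ih]
        simp [hq, hax]
        omega
      · have hcond : ¬ ([a] = ['\\'] ∨ [a] = ['"']) := by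
          simp
          exact ⟨fun hh => hq (Or.inl hh), fun hh => hq (Or.inr hh)⟩
        rw [dif_neg hcond] at ih
        rw [if_neg hcond, ih]
        have ha : ¬ a = '\\' := fun hh => hq (Or.inl hh)
        have step : tokExtra (a :: r) = tokExtra r := by
          cases r with
          | nil => rfl
          | cons b rb => rw [tokExtra.eq_def]; simp only [if_neg ha]
        simp [hq, hax, step]

theorem part1_fold (lines : List String) (C M : Int) :
    (lines.foldl (fun (CM : Int × Int) (line : String) =>
      let l := PySem.List.slice line.toList (some 1) (some (-1))
      let num : Int := l.length
      let code : Int := 2 + num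
      let memory : Int := 0 + num
      let memory := part1LineLoop l 0 memory
      (CM.1 + code, CM.2 + memory)) (C, M)).1 -
    (lines.foldl (fun (CM : Int × Int) (line : String) =>
      let l := PySem.List.slice line.toList (some 1) (some (-1))
      let num : Int := l.length
      let code : Int := 2 + num
      let memory : Int := 0 + num
      let memory := part1LineLoop l 0 memory
      (CM.1 + code, CM.2 + memory)) (C, M)).2 =
    C - M + (lines.map (fun line =>
      2 + tokExtra (PySem.List.slice line.toList (some 1) (some (-1))))).sum := by
  induction lines generalizing C M with
  | nil => simp
  | cons line rest ih =>
    simp only [List.foldl_cons, List.map_cons, List.sum_cons]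
    rw [ih, part1LineLoop_eq]
    simp only [List.drop_zero]
    ring

theorem part1_eq_sum (lines : List String) :
    part1 lines =
      (lines.map (fun line =>
        2 + tokExtra (PySem.List.slice line.toList (some 1) (some (-1))))).sum := by
  unfold part1
  simpa using part1_fold lines 0 0

theorem part1_alt_fold (lines : List String) (t : Int) :
    lines.foldl
      (fun total line =>
        escapesLoop (PySem.List.slice line.toList (some 1) (some (-1))) (total + 2)) t =
    t + (lines.map (fun line =>
      2 + tokExtra (PySem.List.slice line.toList (some 1) (some (-1))))).sum := by
  induction lines generalizing t with
  | nil => simp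
  | cons line rest ih =>
    simp only [List.foldl_cons, List.map_cons, List.sum_cons]
    rw [ih, escapesLoop_eq]
    ring

theorem part1_alt_eq_sum (lines : List String) :
    part1_alt lines =
      (lines.map (fun line =>
        2 + tokExtra (PySem.List.slice line.toList (some 1) (some (-1))))).sum := by
  unfold part1_alt
  simpa using part1_alt_fold lines 0

-- ===== VERDICT (by name: the statement is the Claim_ definition above) =====
theorem part1_spec : Claim_equal_part1 := by
  intro lines _ _
  unfold Spec_part1
  rw [part1_eq_sum, part1_alt_eq_sum]
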